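-- pv_equiv track=rewrite | github.com/uutk/ARGUS | ARGUS/spiders/webarchive.py | reorderUrlstack
-- ===== SOURCE A (Python) =====
-- def reorderUrlstack(urlstack, language, prefer_short_urls):
--    preferred_language = []
--    other_language = []
--    language_tags = []
--    if language == "":
--        preferred_language = urlstack
--    else:
--        for ISO in language:
--            language_tags.append("/{}/".format(ISO))
--            language_tags.append("/{}-{}/".format(ISO, ISO))
--            language_tags.append("?lang={}".format(ISO))
--        for url in urlstack:
--            if any(tag in url for tag in language_tags):
--                preferred_language.append(url)
--            else:
--                other_language.append(url)
--    if prefer_short_urls == "on":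
--        urlstack = sorted(preferred_language, key=len) + sorted(other_language, key=len)
--    else:
--        urlstack = preferred_language + other_language
--    return urlstack
-- ===== SOURCE B (Python) =====
-- def reorderUrlstack(urlstack, language, prefer_short_urls):
--     if language == "":
--         preferred = lambda url: True
--     else:
--         tags = [t for ISO in language
--                   for t in ("/{}/".format(ISO), "/{}-{}/".format(ISO, ISO), "?lang={}".format(ISO))]
--         preferred = lambda url: any(t in url for t in tags)
--     group = lambda url: 0 if preferred(url) else 1
--     if prefer_short_urls == "on":
--         return sorted(urlstack, key=lambda u: (group(u), len(u)))
--     return sorted(urlstack, key=group)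
-- ===== Notes on version B (the rewrite author's own statement) =====
-- stated objective: simpler
-- what changed: B replaces A's two-accumulator partition loop plus concatenation (and two per-group sorts in the short-URL mode) with a single stable sorted() call keyed on group membership (and length when prefer_short_urls=='on'), relying on sort stability for intra-group order.
import Mathlib
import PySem

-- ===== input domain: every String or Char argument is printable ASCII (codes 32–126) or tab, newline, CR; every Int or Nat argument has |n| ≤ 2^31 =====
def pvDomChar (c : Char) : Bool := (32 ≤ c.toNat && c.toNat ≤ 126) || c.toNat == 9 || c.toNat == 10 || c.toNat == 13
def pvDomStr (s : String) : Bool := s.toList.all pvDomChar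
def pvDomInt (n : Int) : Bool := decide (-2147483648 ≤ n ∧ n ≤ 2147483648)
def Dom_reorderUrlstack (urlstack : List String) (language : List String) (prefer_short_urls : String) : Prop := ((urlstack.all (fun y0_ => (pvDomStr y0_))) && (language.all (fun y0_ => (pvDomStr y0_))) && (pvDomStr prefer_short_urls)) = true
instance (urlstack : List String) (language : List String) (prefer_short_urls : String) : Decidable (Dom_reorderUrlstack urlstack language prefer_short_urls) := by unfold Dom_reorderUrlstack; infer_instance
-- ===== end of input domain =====

-- B replaces A's two-list partition plus concatenation (and per-group sorts) with one stable
-- sorted() call keyed on (group[, length]); objective: simpler. Return values only; no mutation.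

-- ===== PORT A =====
-- Note: Python's `language == ""` is always False for the list argument this signature fixes
-- (a list never equals a string), so that branch is dead and is not reachable in the port.
def reorderUrlstack (urlstack : List String) (language : List String) (prefer_short_urls : String) : List String :=
  let language_tags : List String :=
    language.foldl (fun acc iso =>
      (acc ++ ["/" ++ iso ++ "/"]) ++ ["/" ++ iso ++ "-" ++ iso ++ "/"] ++ ["?lang=" ++ iso]) []
  let pr : List String × List String :=
    urlstack.foldl (fun st url =>
      if language_tags.any (fun tag => PySem.Str.isIn tag url) then
        (st.1 ++ [url], st.2)
      else
        (st.1, st.2 ++ [url])) ([], [])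
  if prefer_short_urls == "on" then
    PySem.List.sorted pr.1 (fun u => PySem.Str.len u) ++ PySem.List.sorted pr.2 (fun u => PySem.Str.len u)
  else
    pr.1 ++ pr.2

-- ===== PORT B =====
def reorderUrlstack_alt (urlstack : List String) (language : List String) (prefer_short_urls : String) : List String :=
  let tags : List String :=
    language.flatMap (fun iso => ["/" ++ iso ++ "/", "/" ++ iso ++ "-" ++ iso ++ "/", "?lang=" ++ iso])
  let group : String → Int := fun url => if tags.any (fun t => PySem.Str.isIn t url) then 0 else 1
  if prefer_short_urls == "on" then
    PySem.List.sorted2 urlstack group (fun u => PySem.Str.len u)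
  else
    PySem.List.sorted urlstack group

-- ===== PRECONDITION & SPEC =====
def Spec_reorderUrlstack (urlstack : List String) (language : List String) (prefer_short_urls : String) (out : List String) : Prop := out = reorderUrlstack_alt urlstack language prefer_short_urls
instance (urlstack : List String) (language : List String) (prefer_short_urls : String) (out : List String) : Decidable (Spec_reorderUrlstack urlstack language prefer_short_urls out) := by unfold Spec_reorderUrlstack; infer_instance

-- ===== CLAIM (what is proved, stated in full; the proofs are below) =====
def Claim_equal_reorderUrlstack : Prop := ∀ (urlstack : List String) (language : List String) (prefer_short_urls : String), Dom_reorderUrlstack urlstack language prefer_short_urls → Spec_reorderUrlstack urlstack language prefer_short_urls (reorderUrlstack urlstack language prefer_short_urls)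

-- ===== LEMMAS AND PROOFS =====

-- x goes after all of A (not before any of it) and before all of B: it lands between them.
lemma insertBy_between {α : Type} (before : α → α → Bool) (x : α) (A B : List α)
    (hA : ∀ a ∈ A, before x a = false) (hB : ∀ b ∈ B, before x b = true) :
    PySem.List.insertBy before x (A ++ B) = A ++ x :: B := by
  induction A with
  | nil =>
      cases B with
      | nil => simp [PySem.List.insertBy]
      | cons b B => simp [PySem.List.insertBy, hB b (by simp)]
  | cons a A ih =>
      simp only [List.cons_append, PySem.List.insertBy]
      rw [if_neg (by simp [hA a (by simp)]), ih (fun a ha => hA a (by simp [ha]))]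

-- x goes before all of B: inserting into A ++ B inserts into A.
lemma insertBy_append_right {α : Type} (before : α → α → Bool) (x : α) (A B : List α)
    (hB : ∀ b ∈ B, before x b = true) :
    PySem.List.insertBy before x (A ++ B) = PySem.List.insertBy before x A ++ B := by
  induction A with
  | nil =>
      cases B with
      | nil => rfl
      | cons b B => simp [PySem.List.insertBy, hB b (by simp)]
  | cons a A ih =>
      by_cases h : before x a = true
      · simp [PySem.List.insertBy, h]
      · simp only [List.cons_append, PySem.List.insertBy]
        rw [if_neg h, if_neg h, ih]
        simp

-- x goes after all of A: inserting into A ++ B inserts into B.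
lemma insertBy_append_left {α : Type} (before : α → α → Bool) (x : α) (A B : List α)
    (hA : ∀ a ∈ A, before x a = false) :
    PySem.List.insertBy before x (A ++ B) = A ++ PySem.List.insertBy before x B := by
  induction A with
  | nil => simp
  | cons a A ih =>
      simp only [List.cons_append, PySem.List.insertBy]
      rw [if_neg (by simp [hA a (by simp)]), ih (fun a ha => hA a (by simp [ha]))]

-- two insertion orders agree when they agree pointwise on the list
lemma insertBy_congr {α : Type} (b₁ b₂ : α → α → Bool) (x : α) (A : List α)
    (h : ∀ a ∈ A, b₁ x a = b₂ x a) :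
    PySem.List.insertBy b₁ x A = PySem.List.insertBy b₂ x A := by
  induction A with
  | nil => rfl
  | cons a A ih =>
      simp only [PySem.List.insertBy, h a (by simp)]
      rw [ih (fun a ha => h a (by simp [ha]))]


-- A's tag-building foldl produces B's flatMap of the three tags per ISO code.
lemma tags_foldl_eq_flatMap (l : List String) (init : List String) :
    l.foldl (fun acc iso =>
      (acc ++ ["/" ++ iso ++ "/"]) ++ ["/" ++ iso ++ "-" ++ iso ++ "/"] ++ ["?lang=" ++ iso]) init
    = init ++ l.flatMap (fun iso => ["/" ++ iso ++ "/", "/" ++ iso ++ "-" ++ iso ++ "/", "?lang=" ++ iso]) := by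
  induction l generalizing init with
  | nil => simp
  | cons a l ih => rw [List.foldl_cons, ih]; simp [List.flatMap]

-- A's pair-accumulator partition loop is (filter p, filter !p).
lemma partition_foldl {α : Type} (p : α → Bool) (xs : List α) (A B : List α) :
    xs.foldl (fun (st : List α × List α) x =>
      if p x then (st.1 ++ [x], st.2) else (st.1, st.2 ++ [x])) (A, B)
    = (A ++ xs.filter p, B ++ xs.filter (fun x => !p x)) := by
  induction xs generalizing A B with
  | nil => simp
  | cons x xs ih =>
      by_cases hp : p x = true
      · simp [hp, ih]
      · simp [Bool.not_eq_true] at hp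
        simp [hp, ih]

-- Stable insertion sort keyed on the 0/1 group alone is the partition, in order.
lemma foldl_insert_group {α : Type} (p : α → Bool) (xs A B : List α)
    (hA : ∀ a ∈ A, p a = true) (hB : ∀ b ∈ B, p b = false) :
    xs.foldl (fun acc x =>
        PySem.List.insertBy (fun a b =>
          decide ((if p a then (0:Int) else 1) < (if p b then (0:Int) else 1))) x acc) (A ++ B)
    = (A ++ xs.filter p) ++ (B ++ xs.filter (fun x => !p x)) := by
  induction xs generalizing A B with
  | nil => simp
  | cons x xs ih =>
      by_cases hp : p x = true
      · rw [List.foldl_cons,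
          insertBy_between _ x A B
            (fun a ha => by simp [hp, hA a ha])
            (fun b hb => by simp [hp, hB b hb]),
          show A ++ x :: B = (A ++ [x]) ++ B by simp,
          ih (A ++ [x]) B
            (fun a ha => by rcases List.mem_append.mp ha with h | h
                            · exact hA a h
                            · simp at h; simpa [h] using hp)
            hB]
        simp [hp]
      · simp only [Bool.not_eq_true] at hp
        rw [List.foldl_cons,
          PySem.List.insertBy_of_forall_not_before _ x (A ++ B)
            (fun y hy => by
              rcases List.mem_append.mp hy with h | h
              · simp [hp, hA y h]
              · simp [hp, hB y h]),
          show (A ++ B) ++ [x] = A ++ (B ++ [x]) by simp,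
          ih A (B ++ [x]) hA
            (fun b hb => by rcases List.mem_append.mp hb with h | h
                            · exact hB b h
                            · simp at h; simpa [h] using hp)]
        simp [hp]

-- Stable insertion sort keyed on (group, k) is the per-group k-sort of each part, concatenated.
lemma foldl_insert_group_key {α : Type} (p : α → Bool) (k : α → Int) (xs A B : List α)
    (hA : ∀ a ∈ A, p a = true) (hB : ∀ b ∈ B, p b = false) :
    xs.foldl (fun acc x =>
        PySem.List.insertBy (fun a b =>
          decide ((if p a then (0:Int) else 1) < (if p b then (0:Int) else 1)) ||
          (!decide ((if p b then (0:Int) else 1) < (if p a then (0:Int) else 1)) &&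
            decide (k a < k b))) x acc) (A ++ B)
    = (xs.filter p).foldl (fun acc x =>
        PySem.List.insertBy (fun a b => decide (k a < k b)) x acc) A
      ++ (xs.filter (fun x => !p x)).foldl (fun acc x =>
        PySem.List.insertBy (fun a b => decide (k a < k b)) x acc) B := by
  induction xs generalizing A B with
  | nil => simp
  | cons x xs ih =>
      by_cases hp : p x = true
      · rw [List.foldl_cons,
          insertBy_append_right _ x A B (fun b hb => by simp [hp, hB b hb]),
          insertBy_congr _ (fun a b => decide (k a < k b)) x A
            (fun a ha => by simp [hp, hA a ha]),
          ih (PySem.List.insertBy (fun a b => decide (k a < k b)) x A) B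
            (fun a ha => by
              rcases (PySem.List.mem_insertBy _ _ _ _).mp ha with h | h
              · simpa [h] using hp
              · exact hA a h)
            hB]
        simp [hp]
      · simp only [Bool.not_eq_true] at hp
        rw [List.foldl_cons,
          insertBy_append_left _ x A B (fun a ha => by simp [hp, hA a ha]),
          insertBy_congr _ (fun a b => decide (k a < k b)) x B
            (fun b hb => by simp [hp, hB b hb]),
          ih A (PySem.List.insertBy (fun a b => decide (k a < k b)) x B) hA
            (fun b hb => by
              rcases (PySem.List.mem_insertBy _ _ _ _).mp hb with h | h
              · simpa [h] using hp
              · exact hB b h)]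
        simp [hp]

-- the two split corollaries, phrased on the sorts themselves
lemma sorted_group_split {α : Type} (p : α → Bool) (xs : List α) :
    PySem.List.sorted xs (fun x => if p x then (0:Int) else 1)
      = xs.filter p ++ xs.filter (fun x => !p x) := by
  rw [PySem.List.sorted_eq_foldl_insertBy]
  simpa using foldl_insert_group p xs [] [] (by simp) (by simp)

lemma sorted2_group_split {α : Type} (p : α → Bool) (k : α → Int) (xs : List α) :
    PySem.List.sorted2 xs (fun x => if p x then (0:Int) else 1) k
      = PySem.List.sorted (xs.filter p) k ++ PySem.List.sorted (xs.filter (fun x => !p x)) k := by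
  rw [PySem.List.sorted_eq_foldl_insertBy, PySem.List.sorted_eq_foldl_insertBy]
  show xs.foldl (fun acc x =>
        PySem.List.insertBy (fun a b =>
          decide ((if p a then (0:Int) else 1) < (if p b then (0:Int) else 1)) ||
          (!decide ((if p b then (0:Int) else 1) < (if p a then (0:Int) else 1)) &&
            decide (k a < k b))) x acc) [] = _
  simpa using foldl_insert_group_key p k xs [] [] (by simp) (by simp)

-- ===== VERDICT (by name: the statement is the Claim_ definition above) =====
theorem reorderUrlstack_spec : Claim_equal_reorderUrlstack := by
  intro urlstack language prefer_short_urls _hdom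
  unfold Spec_reorderUrlstack reorderUrlstack reorderUrlstack_alt
  simp only [tags_foldl_eq_flatMap, List.nil_append, partition_foldl]
  by_cases hon : prefer_short_urls == "on"
  · simp only [hon, if_true, sorted2_group_split]
  · simp only [hon, Bool.false_eq_true, if_false, sorted_group_split]
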